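-- pv_equiv track=rewrite | github.com/AnandKulkarniMeta/AI-Travel-Planner | app.py | get_trip_persona
-- ===== SOURCE A (Python) =====
-- def get_trip_persona(interests, budget, duration):
--     personas = {
--         "Adventure Seeker": ["Adventure", "Nature", "Sports"],
--         "Culture Explorer": ["Culture", "History", "Art", "Architecture"],
--         "Urban Wanderer": ["Shopping", "Food", "Music", "Photography"],
--         "Relaxation Enthusiast": ["Relaxation", "Beach", "Spa"]
--     }
--
--     user_interests = set(interests)
--     max_matches = 0
--     best_persona = "Balanced Traveler"
--
--     for persona, persona_interests in personas.items():
--         matches = len(user_interests.intersection(persona_interests))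
--         if matches > max_matches:
--             max_matches = matches
--             best_persona = persona
--
--     return best_persona
-- ===== SOURCE B (Python) =====
-- def get_trip_persona(interests, budget, duration):
--     personas = {
--         "Adventure Seeker": ["Adventure", "Nature", "Sports"],
--         "Culture Explorer": ["Culture", "History", "Art", "Architecture"],
--         "Urban Wanderer": ["Shopping", "Food", "Music", "Photography"],
--         "Relaxation Enthusiast": ["Relaxation", "Beach", "Spa"]
--     }
--     # inverted index: interest -> the persona that owns it
--     owner = {i: p for p, ints in personas.items() for i in ints}
--     votes = {}
--     for interest in set(interests):
--         p = owner.get(interest)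
--         if p is not None:
--             votes[p] = votes.get(p, 0) + 1
--     best_persona, most = "Balanced Traveler", 0
--     for p in personas:
--         if votes.get(p, 0) > most:
--             best_persona, most = p, votes.get(p, 0)
--     return best_persona
-- ===== Notes on version B (the rewrite author's own statement) =====
-- stated objective: alternative
-- what changed: A intersects the deduped user interests with each persona's interest list; B builds an inverted interest-to-persona index once, tallies one vote per distinct user interest via a dict lookup, and then scans the personas in declared order for the strictly-greatest vote count.
import Mathlib
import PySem

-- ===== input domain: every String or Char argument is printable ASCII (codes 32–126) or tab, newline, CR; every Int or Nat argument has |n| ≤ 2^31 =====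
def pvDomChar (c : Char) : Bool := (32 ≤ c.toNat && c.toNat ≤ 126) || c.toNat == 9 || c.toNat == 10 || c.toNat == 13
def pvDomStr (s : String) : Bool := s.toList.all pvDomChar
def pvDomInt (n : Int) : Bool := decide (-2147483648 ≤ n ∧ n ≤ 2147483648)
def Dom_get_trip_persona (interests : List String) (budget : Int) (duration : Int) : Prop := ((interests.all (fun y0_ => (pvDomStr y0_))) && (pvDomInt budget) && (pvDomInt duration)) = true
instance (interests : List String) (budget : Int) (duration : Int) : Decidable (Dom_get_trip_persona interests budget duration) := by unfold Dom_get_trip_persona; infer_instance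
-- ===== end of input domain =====

-- B replaces A's per-persona set-intersection scan by an inverted interest→persona index plus a vote tally over the deduped user interests; objective: alternative decomposition (same observable result).


-- the persona table, the identical literal in both Pythons
def pvPersonas : List (String × List String) :=
  [("Adventure Seeker", ["Adventure", "Nature", "Sports"]),
   ("Culture Explorer", ["Culture", "History", "Art", "Architecture"]),
   ("Urban Wanderer", ["Shopping", "Food", "Music", "Photography"]),
   ("Relaxation Enthusiast", ["Relaxation", "Beach", "Spa"])]

-- ===== PORT A =====
def get_trip_persona (interests : List String) (budget : Int) (duration : Int) : String :=
  let user_interests : PySem.Set String := PySem.Set.ofList interests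
  let res := pvPersonas.foldl (fun (st : Int × String) pr =>
    let mtc : Int := ((PySem.Set.inter user_interests pr.2).length : Int)
    if mtc > st.1 then (mtc, pr.1) else st) (0, "Balanced Traveler")
  res.2

-- ===== PORT B =====
-- owner = {i: p for p, ints in personas.items() for i in ints}
def pvOwner : PySem.Dict String String :=
  pvPersonas.foldl (fun d pr => pr.2.foldl (fun d i => d.insert i pr.1) d) PySem.Dict.empty

def get_trip_persona_alt (interests : List String) (budget : Int) (duration : Int) : String :=
  let votes : PySem.Dict String Int :=
    (PySem.Set.ofList interests).foldl (fun d interest =>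
      match pvOwner.get? interest with
      | some p => d.insert p (d.getD p 0 + 1)
      | none => d) PySem.Dict.empty
  let res := pvPersonas.foldl (fun (st : String × Int) pr =>
    if votes.getD pr.1 0 > st.2 then (pr.1, votes.getD pr.1 0) else st)
    ("Balanced Traveler", 0)
  res.1

-- ===== PRECONDITION & SPEC =====
def Spec_get_trip_persona (interests : List String) (budget : Int) (duration : Int) (out : String) : Prop := out = get_trip_persona_alt interests budget duration
instance (interests : List String) (budget : Int) (duration : Int) (out : String) : Decidable (Spec_get_trip_persona interests budget duration out) := by unfold Spec_get_trip_persona; infer_instance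

-- ===== CLAIM (what is proved, stated in full; the proofs are below) =====
def Claim_equal_get_trip_persona : Prop := ∀ (interests : List String) (budget : Int) (duration : Int), Dom_get_trip_persona interests budget duration → Spec_get_trip_persona interests budget duration (get_trip_persona interests budget duration)

-- ===== LEMMAS AND PROOFS =====

-- the vote-tally loop counts, for each persona p, the interests whose owner lookup is p
lemma getD_votes (l : List String) (d : PySem.Dict String Int) (p : String) :
    (l.foldl (fun d x => match pvOwner.get? x with
      | some q => d.insert q (d.getD q 0 + 1)
      | none => d) d).getD p 0
    = d.getD p 0 + (l.countP (fun x => pvOwner.get? x == some p) : Int) := by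
  induction l generalizing d with
  | nil => simp
  | cons x l ih =>
    simp only [List.foldl_cons, List.countP_cons]
    cases h : pvOwner.get? x with
    | none => simp [ih]
    | some q =>
      by_cases hq : q = p
      · subst hq
        simp [ih, PySem.Dict.getD_insert_self]
        ring
      · have hne : p ≠ q := fun hpq => hq hpq.symm
        simp [ih, PySem.Dict.getD_insert_of_ne _ _ _ hne, hq]

-- for a dict with distinct keys, "lookup x hits value p" is membership of x among the keys mapped to p
lemma lookup_hits (p x : String) (l : List (String × String)) (h : (l.map Prod.fst).Nodup) :
    ((PySem.Dict.mk l).get? x == some p)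
    = ((l.filter (fun pr => pr.2 == p)).map Prod.fst).contains x := by
  induction l with
  | nil => rfl
  | cons kv l ih =>
    obtain ⟨k, v⟩ := kv
    simp only [List.map_cons, List.nodup_cons] at h
    obtain ⟨hk, hnd⟩ := h
    rw [PySem.Dict.get?_mk_cons]
    by_cases hkx : k = x
    · subst hkx
      by_cases hvp : v = p
      · subst hvp; simp
      · have hmem : (((l.filter (fun pr => pr.2 == p)).map Prod.fst).contains k) = false := by
          simp only [List.contains_eq_mem, decide_eq_false_iff_not, List.mem_map, List.mem_filter]
          rintro ⟨pr, ⟨hpr, -⟩, rfl⟩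
          exact hk (List.mem_map_of_mem hpr)
        have hcond : ((k, v).2 == p) = false := by simp [hvp]
        rw [List.filter_cons, hcond]
        simp only [Bool.false_eq_true, if_false]
        rw [hmem]
        simp [hvp]
    · have hne : (k == x) = false := by simp [hkx]
      rw [hne]
      simp only [Bool.false_eq_true, if_false]
      rw [ih hnd]
      by_cases hvp : v = p
      · subst hvp
        simp [Ne.symm hkx]
      · simp [hvp]

-- the inverted index, evaluated
lemma owner_eval : pvOwner = PySem.Dict.mk
  [("Adventure", "Adventure Seeker"), ("Nature", "Adventure Seeker"), ("Sports", "Adventure Seeker"),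
   ("Culture", "Culture Explorer"), ("History", "Culture Explorer"), ("Art", "Culture Explorer"),
   ("Architecture", "Culture Explorer"), ("Shopping", "Urban Wanderer"), ("Food", "Urban Wanderer"),
   ("Music", "Urban Wanderer"), ("Photography", "Urban Wanderer"), ("Relaxation", "Relaxation Enthusiast"),
   ("Beach", "Relaxation Enthusiast"), ("Spa", "Relaxation Enthusiast")] := rfl

-- per persona: "owner lookup hits p" is exactly membership in p's interest list
lemma owner1 (x : String) : (pvOwner.get? x == some "Adventure Seeker")
    = (["Adventure", "Nature", "Sports"] : List String).contains x := by
  rw [owner_eval, lookup_hits _ _ _ (by decide)]; rfl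

lemma owner2 (x : String) : (pvOwner.get? x == some "Culture Explorer")
    = (["Culture", "History", "Art", "Architecture"] : List String).contains x := by
  rw [owner_eval, lookup_hits _ _ _ (by decide)]; rfl

lemma owner3 (x : String) : (pvOwner.get? x == some "Urban Wanderer")
    = (["Shopping", "Food", "Music", "Photography"] : List String).contains x := by
  rw [owner_eval, lookup_hits _ _ _ (by decide)]; rfl

lemma owner4 (x : String) : (pvOwner.get? x == some "Relaxation Enthusiast")
    = (["Relaxation", "Beach", "Spa"] : List String).contains x := by
  rw [owner_eval, lookup_hits _ _ _ (by decide)]; rfl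

-- ===== VERDICT (by name: the statement is the Claim_ definition above) =====
set_option maxHeartbeats 2000000 in
theorem get_trip_persona_spec : Claim_equal_get_trip_persona := by
  intro interests budget duration _
  unfold Spec_get_trip_persona get_trip_persona get_trip_persona_alt
  simp only [pvPersonas, List.foldl_cons, List.foldl_nil, PySem.Set.inter]
  simp only [getD_votes, PySem.Dict.getD_empty, owner1, owner2, owner3, owner4,
    ← List.countP_eq_length_filter, PySem.Set.contains_eq_listContains, zero_add]
  split_ifs <;> rfl
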